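-- pv_equiv track=rewrite | github.com/ssafy-gwangju-03-java/marathon-algorithms | week_14/문제_02/송준혁_2212.py | station
-- ===== SOURCE A (Python) =====
-- def station(N, K, sensors):
--     """
--     1. 센서 좌표 오름차순 정렬
--     2. 각 센서간 거리 차이 계산 후 내림차순 정렬
--     3. 집중국이 K개라면 각 집중국 간 사이는 K - 1개
--        -> 센서 간 거리 차이 배열에서 큰 순서대로 K - 1개 무시 가능
--        -> 센서 간 거리 차이 배열에서 K - 1번 인덱스부터의 합
--     """
--
--     # 집중국이 센서 개수보다 크거나 같으면 개당 한개씩 배치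
--     if K >= N:
--         return 0
--
--     sensors.sort()
--
--     diff = []
--     for i in range(N - 1):
--         diff.append(sensors[i + 1] - sensors[i])
--     diff.sort(reverse=True)
--
--     sum_diff = sum(diff[K - 1 :])
--     return sum_diff
-- ===== SOURCE B (Python) =====
-- def station(N, K, sensors):
--     # Threshold selection: binary-search the (N-K)-th smallest gap value by counting,
--     # then sum gaps below it plus the needed copies of it; no sort and no heap on gaps.
--     # sensors is sorted in place, like A.
--     if K >= N:
--         return 0
--     sensors.sort()
--     gaps = [sensors[i + 1] - sensors[i] for i in range(N - 1)]
--     m = N - K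
--     lo, hi = 0, max(gaps)
--     while lo < hi:
--         mid = (lo + hi) // 2
--         if sum(1 for g in gaps if g <= mid) >= m:
--             hi = mid
--         else:
--             lo = mid + 1
--     below = sum(g for g in gaps if g < lo)
--     return below + lo * (m - sum(1 for g in gaps if g < lo))
-- ===== Notes on version B (the rewrite author's own statement) =====
-- stated objective: alternative
-- what changed: B never orders the gap list at all: it binary-searches the (N-K)-th smallest gap value by counting gaps below a threshold, then returns the sum of gaps strictly below that value plus the needed number of copies of it, instead of A's descending sort of the gaps and tail-slice sum.
-- outside the precondition, e.g. on station(3, 0, [1, 5, 20]): A returns 4, B returns 34; on station(3, -1, [1, 5, 20]): A returns 19, B returns 49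
import Mathlib
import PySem

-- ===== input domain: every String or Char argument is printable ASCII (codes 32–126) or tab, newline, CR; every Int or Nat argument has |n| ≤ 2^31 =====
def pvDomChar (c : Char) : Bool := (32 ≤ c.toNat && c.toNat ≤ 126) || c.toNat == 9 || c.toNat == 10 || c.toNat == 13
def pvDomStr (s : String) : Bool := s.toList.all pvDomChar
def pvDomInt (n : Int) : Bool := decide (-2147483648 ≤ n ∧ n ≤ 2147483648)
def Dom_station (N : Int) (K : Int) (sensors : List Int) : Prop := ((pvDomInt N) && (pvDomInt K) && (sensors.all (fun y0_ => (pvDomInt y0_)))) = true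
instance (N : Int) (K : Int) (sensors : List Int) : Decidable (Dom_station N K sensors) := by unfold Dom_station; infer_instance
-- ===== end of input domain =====

-- B replaces A's descending sort + tail-slice of the gap list by a value-space binary search:
-- it counts gaps below a threshold to locate the (N-K)-th smallest gap value, then sums gaps
-- strictly below it plus the needed copies of it (objective: alternative).
-- Both A and B sort `sensors` in place; the equivalence proved here is about the return value.

-- ===== PORT A =====
def station (N : Int) (K : Int) (sensors : List Int) : Int :=
  if K ≥ N then 0
  else
    let s := PySem.List.sorted sensors (fun x => x) false
    let diff := (PySem.List.pyRange 0 (N - 1) 1).foldl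
      (fun acc i => acc ++ [PySem.List.pyGetD s (i + 1) 0 - PySem.List.pyGetD s i 0]) []
    let diffS := PySem.List.sorted diff (fun x => x) true
    (PySem.List.slice diffS (some (K - 1)) none).sum

-- ===== PORT B =====
-- the while loop: binary search for the least value v with #(gaps ≤ v) ≥ m
def bsLoop (gaps : List Int) (m : Int) (lo : Int) (hi : Int) : Int :=
  if h : lo < hi then
    let mid := PySem.Int.floordiv (lo + hi) 2
    if m ≤ (gaps.countP (fun g => decide (g ≤ mid)) : Int)
    then bsLoop gaps m lo mid
    else bsLoop gaps m (mid + 1) hi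
  else lo
termination_by (hi - lo).toNat
decreasing_by
  · have h1 := (PySem.Int.floordiv_lt_iff_lt_mul (a := lo + hi) (b := 2) (q := hi) (by omega)).mpr (by omega)
    omega
  · have h1 := (PySem.Int.floordiv_lt_iff_lt_mul (a := lo + hi) (b := 2) (q := hi) (by omega)).mpr (by omega)
    have h2 := (PySem.Int.le_floordiv_iff_mul_le (a := lo + hi) (b := 2) (q := lo) (by omega)).mpr (by omega)
    omega

def station_alt (N : Int) (K : Int) (sensors : List Int) : Int :=
  if K ≥ N then 0
  else
    let s := PySem.List.sorted sensors (fun x => x) false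
    let gaps := (PySem.List.pyRange 0 (N - 1) 1).map
      (fun i => PySem.List.pyGetD s (i + 1) 0 - PySem.List.pyGetD s i 0)
    let m := N - K
    let t := bsLoop gaps m 0 ((PySem.List.max? gaps (fun x => x)).getD 0)
    let below := (gaps.filter (fun g => decide (g < t))).sum
    below + t * (m - (gaps.countP (fun g => decide (g < t)) : Int))

-- ===== PRECONDITION & SPEC =====
-- Pre_ restricts to the natural domain: it excludes N > len(sensors) with K < N (A raises
-- IndexError there) and non-positive station counts K ≤ 0 with K < N, where A's diff[K-1:]
-- returns an accidental tail (or all) of the gap list via Python's negative-slice wraparound;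
-- B's threshold search assumes at least one station.
def Pre_station (N : Int) (K : Int) (sensors : List Int) : Prop :=
  N ≤ K ∨ (1 ≤ K ∧ K < N ∧ N ≤ (sensors.length : Int))
instance (N : Int) (K : Int) (sensors : List Int) : Decidable (Pre_station N K sensors) := by
  unfold Pre_station; infer_instance

def pvWitness_station : Int × Int × List Int := (3, 2, [1, 5, 20])

def Spec_station (N : Int) (K : Int) (sensors : List Int) (out : Int) : Prop := out = station_alt N K sensors
instance (N : Int) (K : Int) (sensors : List Int) (out : Int) : Decidable (Spec_station N K sensors out) := by unfold Spec_station; infer_instance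

-- ===== CLAIM (what is proved, stated in full; the proofs are below) =====
def Claim_equal_station : Prop := ∀ (N : Int) (K : Int) (sensors : List Int), Dom_station N K sensors → Pre_station N K sensors → Spec_station N K sensors (station N K sensors)

-- ===== LEMMAS AND PROOFS =====

-- on an ascending list, the elements below a threshold are an initial segment
lemma sorted_filter_lt_eq_take (t : Int) : ∀ (a : List Int), a.Pairwise (· ≤ ·) →
    a.filter (fun g => decide (g < t)) = a.take (a.countP (fun g => decide (g < t)))
  | [], _ => rfl
  | x :: xs, h => by
    rcases List.pairwise_cons.mp h with ⟨hx, hxs⟩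
    by_cases hxt : x < t
    · simp [hxt, sorted_filter_lt_eq_take t xs hxs]
    · have hnone : ∀ y ∈ xs, ¬ ((fun g => decide (g < t)) y = true) := by
        intro y hy
        have := hx y hy
        simp
        omega
      have hf : xs.filter (fun g => decide (g < t)) = [] := List.filter_eq_nil_iff.mpr hnone
      have hc : xs.countP (fun g => decide (g < t)) = 0 := List.countP_eq_zero.mpr hnone
      simp [hxt, hf, hc]

-- if every element from index j on falsifies p, at most j elements satisfy it
lemma countP_le_of_tail_false (a : List Int) (p : Int → Bool) (j : Nat)
    (h : ∀ (i : Nat) (hi : i < a.length), j ≤ i → p a[i] = false) : a.countP p ≤ j := by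
  have hz : (a.drop j).countP p = 0 := by
    refine List.countP_eq_zero.mpr ?_
    intro x hx
    obtain ⟨i, hi, hxe⟩ := List.mem_iff_getElem.mp hx
    rw [List.getElem_drop] at hxe
    have hlen : j + i < a.length := by
      have := List.length_drop (l := a) (i := j); omega
    subst hxe
    simp [h (j + i) hlen (by omega)]
  have h1 : a.countP p = (a.take j).countP p + (a.drop j).countP p := by
    rw [← List.countP_append, List.take_append_drop]
  have h2 : (a.take j).countP p ≤ (a.take j).length := List.countP_le_length
  simp only [List.length_take] at h2
  omega

-- if the first k elements satisfy p, at least k elements satisfy it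
lemma countP_ge_of_head_true (a : List Int) (p : Int → Bool) (k : Nat) (hk : k ≤ a.length)
    (h : ∀ (i : Nat) (hi : i < a.length), i < k → p a[i] = true) : k ≤ a.countP p := by
  have ht : (a.take k).countP p = (a.take k).length := by
    refine List.countP_eq_length.mpr ?_
    intro x hx
    obtain ⟨i, hi, hxe⟩ := List.mem_iff_getElem.mp hx
    rw [List.getElem_take] at hxe
    have hlen : i < a.length := by simp [List.length_take] at hi; omega
    subst hxe
    exact h i hlen (by simp [List.length_take] at hi; omega)
  have h1 : a.countP p = (a.take k).countP p + (a.drop k).countP p := by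
    rw [← List.countP_append, List.take_append_drop]
  simp only [List.length_take] at ht
  omega

-- binary search returns its target
lemma bsLoop_eq (gaps : List Int) (m tstar : Int)
    (hP : ∀ v : Int, m ≤ (gaps.countP (fun g => decide (g ≤ v)) : Int) ↔ tstar ≤ v) :
    ∀ (n : Nat) (lo hi : Int), (hi - lo).toNat ≤ n → lo ≤ tstar → tstar ≤ hi →
    bsLoop gaps m lo hi = tstar := by
  intro n
  induction n with
  | zero =>
    intro lo hi hle h1 h2
    rw [bsLoop]
    have hnlt : ¬ lo < hi := by omega
    simp only [hnlt, dite_false]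
    omega
  | succ k ih =>
    intro lo hi hle h1 h2
    rw [bsLoop]
    by_cases hlt : lo < hi
    · simp only [hlt, dite_true]
      have hmid := PySem.Int.floordiv_two_mid_bounds (le_of_lt hlt)
      have hmidlt : PySem.Int.floordiv (lo + hi) 2 < hi :=
        (PySem.Int.floordiv_lt_iff_lt_mul (a := lo + hi) (b := 2) (q := hi) (by omega)).mpr (by omega)
      by_cases hc : m ≤ (gaps.countP (fun g => decide (g ≤ PySem.Int.floordiv (lo + hi) 2)) : Int)
      · simp only [hc, if_pos]
        exact ih lo _ (by omega) h1 ((hP _).mp hc)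
      · simp only [hc]
        have hts : ¬ tstar ≤ PySem.Int.floordiv (lo + hi) 2 := fun h => hc ((hP _).mpr h)
        exact ih _ hi (by omega) (by omega) h2
    · simp only [hlt, dite_false]
      omega

-- the core equality, stated over the gap list
lemma threshold_sum_eq (gaps : List Int) (m : Int) (M : Int)
    (hm1 : 1 ≤ m) (hmlen : m ≤ (gaps.length : Int))
    (hnn : ∀ g ∈ gaps, 0 ≤ g)
    (hM : PySem.List.max? gaps (fun x => x) = some M) :
    ((PySem.List.sorted gaps (fun x => x) false).take
        ((gaps.length : Int) - ((gaps.length : Int) - m)).toNat).sum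
      = (gaps.filter (fun g => decide (g < bsLoop gaps m 0 M))).sum
        + bsLoop gaps m 0 M * (m - (gaps.countP (fun g => decide (g < bsLoop gaps m 0 M)) : Int)) := by
  set a := PySem.List.sorted gaps (fun x => x) false with ha
  have ha_pair : a.Pairwise (· ≤ ·) := PySem.List.sorted_pairwise gaps (fun x => x)
  have ha_perm : a.Perm gaps := PySem.List.sorted_perm gaps (fun x => x) false
  have halen : a.length = gaps.length := PySem.List.length_sorted gaps (fun x => x) false
  have hmono : ∀ (p q : Nat) (hpq : p ≤ q) (hq : q < a.length),
      a[p]'(by omega) ≤ a[q]'(hq) := by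
    intro p q hpq hq
    exact PySem.List.sorted_id_getElem_mono gaps hpq hq
  set j : Nat := m.toNat - 1 with hj
  have hjlt : j < a.length := by omega
  set tstar : Int := a[j]'(hjlt) with htstar
  have hcount_transfer : ∀ p : Int → Bool, gaps.countP p = a.countP p :=
    fun p => (List.Perm.countP_eq p ha_perm).symm
  -- the counting predicate is the threshold predicate
  have hP : ∀ v : Int, m ≤ (gaps.countP (fun g => decide (g ≤ v)) : Int) ↔ tstar ≤ v := by
    intro v
    rw [hcount_transfer]
    constructor
    · intro hcnt
      by_contra hv
      have hle : a.countP (fun g => decide (g ≤ v)) ≤ j := by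
        refine countP_le_of_tail_false a _ j ?_
        intro i hi hji
        have := hmono j i hji hi
        simp only [decide_eq_false_iff_not]
        omega
      omega
    · intro hv
      have hge : j + 1 ≤ a.countP (fun g => decide (g ≤ v)) := by
        refine countP_ge_of_head_true a _ (j + 1) (by omega) ?_
        intro i hi hik
        have := hmono i j (by omega) hjlt
        simp only [decide_eq_true_eq]
        omega
      omega
  have h0t : 0 ≤ tstar := hnn _ ((PySem.List.mem_sorted gaps _ false _).mp (a.getElem_mem hjlt))
  have htM : tstar ≤ M :=
    PySem.List.max?_isMax hM tstar ((PySem.List.mem_sorted gaps _ false _).mp (a.getElem_mem hjlt))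
  have ht : bsLoop gaps m 0 M = tstar :=
    bsLoop_eq gaps m tstar hP (M - 0).toNat 0 M (le_refl _) h0t htM
  rw [ht]
  -- transfer the filter/count on gaps to the sorted list a
  have hfsum : (gaps.filter (fun g => decide (g < tstar))).sum
      = (a.filter (fun g => decide (g < tstar))).sum :=
    (List.Perm.filter _ ha_perm).sum_eq.symm
  rw [hfsum, hcount_transfer]
  set c : Nat := a.countP (fun g => decide (g < tstar)) with hcdef
  have hfilter : a.filter (fun g => decide (g < tstar)) = a.take c :=
    sorted_filter_lt_eq_take tstar a ha_pair
  have hcj : c ≤ j := by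
    rw [hcdef]
    refine countP_le_of_tail_false a _ j ?_
    intro i hi hji
    have := hmono j i hji hi
    simp only [decide_eq_false_iff_not]
    omega
  have hclt : c < a.length := by omega
  -- a[c] is not below the threshold
  have hac : ¬ a[c]'(hclt) < tstar := by
    intro hlt
    have hge : c + 1 ≤ a.countP (fun g => decide (g < tstar)) := by
      refine countP_ge_of_head_true a _ (c + 1) (by omega) ?_
      intro i hi hik
      simp only [decide_eq_true_eq]
      rcases Nat.lt_or_ge i c with hic | hic
      · have hlt2 : i < (a.take c).length := by simp [List.length_take]; omega
        have heq : (a.take c)[i]'hlt2 = a[i]'hi := List.getElem_take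
        have hmem : a[i]'(hi) ∈ a.take c := by
          rw [← heq]; exact List.getElem_mem _
        rw [← hfilter] at hmem
        have := (List.mem_filter.mp hmem).2
        simpa using this
      · have hiec : i = c := by omega
        subst hiec
        exact hlt
    omega
  have hjlen : j + 1 ≤ a.length := by omega
  -- split the first m elements at c; beyond c they all equal tstar
  have htk : ((gaps.length : Int) - ((gaps.length : Int) - m)).toNat = j + 1 := by omega
  rw [htk]
  have hsplit : a.take (j + 1) = a.take c ++ (a.take (j + 1)).drop c := by
    nth_rewrite 1 [← List.take_append_drop c (a.take (j + 1))]
    rw [List.take_take, Nat.min_eq_left (by omega)]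
  have hseglen : ((a.take (j + 1)).drop c).length = (j + 1) - c := by
    simp [List.length_take, List.length_drop]
    omega
  have hseg : (a.take (j + 1)).drop c = List.replicate ((j + 1) - c) tstar := by
    refine List.eq_replicate_iff.mpr ⟨hseglen, ?_⟩
    intro b hb
    obtain ⟨i, hi, hbe⟩ := List.mem_iff_getElem.mp hb
    rw [List.getElem_drop, List.getElem_take] at hbe
    have hbound : c + i < j + 1 := by
      rw [hseglen] at hi; omega
    have h1 : a[c + i]'(by omega) ≤ tstar := hmono (c + i) j (by omega) hjlt
    have h2 : tstar ≤ a[c + i]'(by omega) := le_trans (by omega) (hmono c (c + i) (by omega) (by omega))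
    omega
  rw [hfilter, hsplit, List.sum_append, hseg, List.sum_replicate, nsmul_eq_mul]
  have hcast : (((j + 1) - c : Nat) : Int) = m - (c : Int) := by omega
  rw [hcast]
  ring

-- ===== VERDICT (by name: the statement is the Claim_ definition above) =====
theorem station_spec : Claim_equal_station := by
  intro N K sensors _ hpre
  unfold Spec_station station station_alt
  by_cases hKN : K ≥ N
  · simp [hKN]
  · simp only [hKN, if_false]
    obtain ⟨hK1, hKltN, hNlen⟩ : 1 ≤ K ∧ K < N ∧ N ≤ (sensors.length : Int) := by
      rcases hpre with h | h
      · omega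
      · exact h
    set s := PySem.List.sorted sensors (fun x => x) false with hs
    have hslen : s.length = sensors.length := PySem.List.length_sorted sensors (fun x => x) false
    set f : Int → Int := fun i => PySem.List.pyGetD s (i + 1) 0 - PySem.List.pyGetD s i 0 with hf
    have hdiff : (PySem.List.pyRange 0 (N - 1) 1).foldl (fun acc i => acc ++ [f i]) []
        = (PySem.List.pyRange 0 (N - 1) 1).map f := by
      simpa using PySem.List.foldl_append_singleton_eq_map f (PySem.List.pyRange 0 (N - 1) 1) []
    rw [hdiff]
    set gaps := (PySem.List.pyRange 0 (N - 1) 1).map f with hgaps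
    have hglen : (gaps.length : Int) = N - 1 := by
      rw [hgaps, List.length_map, PySem.List.length_pyRange_one]
      omega
    -- each gap is a difference of consecutive elements of the ascending sort, hence ≥ 0
    have hnn : ∀ g ∈ gaps, 0 ≤ g := by
      intro g hg
      rw [hgaps] at hg
      obtain ⟨i, hi, hgi⟩ := List.mem_map.mp hg
      rw [PySem.List.mem_pyRange_one] at hi
      have hi1 : i + 1 < (s.length : Int) := by omega
      have hi0 : (0 : Int) ≤ i := hi.1
      rw [hf] at hgi
      simp only at hgi
      rw [PySem.List.pyGetD_eq_getElem s 0 (by omega) hi1,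
          PySem.List.pyGetD_eq_getElem s 0 hi0 (by omega)] at hgi
      have hmono2 := PySem.List.sorted_id_getElem_mono sensors
        (p := i.toNat) (q := (i + 1).toNat) (by omega)
        (by rw [PySem.List.length_sorted]; omega)
      simp only [← hs] at hmono2
      omega
    -- the descending sort is the reverse of the ascending sort
    set a := PySem.List.sorted gaps (fun x => x) false with ha
    have ha_pair : a.Pairwise (· ≤ ·) := PySem.List.sorted_pairwise gaps (fun x => x)
    have ha_perm : a.Perm gaps := PySem.List.sorted_perm gaps (fun x => x) false
    have halen : a.length = gaps.length := PySem.List.length_sorted gaps (fun x => x) false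
    have hdesc : PySem.List.sorted gaps (fun x => x) true = a.reverse := by
      refine List.Perm.eq_of_pairwise (le := fun x y : Int => y ≤ x)
        (fun x y _ _ h1 h2 => le_antisymm h2 h1)
        (PySem.List.sorted_pairwise_rev gaps (fun x => x))
        (List.pairwise_reverse.mpr ha_pair)
        ?_
      exact (PySem.List.sorted_perm gaps (fun x => x) true).trans
        (ha_perm.symm.trans a.reverse_perm.symm)
    rw [hdesc, PySem.List.slice_from _ (by omega : (0 : Int) ≤ K - 1),
        List.drop_reverse, List.sum_reverse]
    -- the kept prefix has length m = N - K
    have hm1 : (1 : Int) ≤ N - K := by omega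
    have htake : a.length - (K - 1).toNat
        = ((gaps.length : Int) - ((gaps.length : Int) - (N - K))).toNat := by
      rw [halen]; omega
    rw [htake]
    -- B's max(gaps) is defined (gaps nonempty)
    rcases hMx : PySem.List.max? gaps (fun x => x) with _ | M
    · exfalso
      have := (PySem.List.max?_eq_none_iff gaps (fun x => x)).mp hMx
      rw [this] at hglen
      simp at hglen
      omega
    · simp only [Option.getD_some]
      exact threshold_sum_eq gaps (N - K) M hm1 (by omega) hnn hMx
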